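-- pv_equiv track=rewrite | github.com/akhil-joy-20/Interview-Simulator | Interview_simulator_final/resume_analyser.py | skills_new_fn
-- ===== SOURCE A (Python) =====
-- def skills_new_fn(keywords):
--     # Define the priority dictionary higher number higher priority small case
--     priority_dict = {
--         'python': 10,
--         'java': 9,
--         'c': 18,
--         'mi': 5,
--         'cloud': 7
--     }
--
--     # Use a list comprehension to make all elements lower case
--     keywords = [word.lower() for word in keywords]
--
--     # Sort the keywords by priority, in descending order
--     sorted_keywords = sorted(keywords, key=lambda x: priority_dict.get(x, 0), reverse=True)
--
--     # Select the top 5 keywords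
--     return sorted_keywords[:3]
-- ===== SOURCE B (Python) =====
-- def skills_new_fn(keywords):
--     # Bucket gather instead of a comparison sort: walk the fixed priority
--     # values in descending order and collect the words of each bucket in
--     # encounter order (matching sorted's stable reverse tie order).
--     priority_dict = {
--         'python': 10,
--         'java': 9,
--         'c': 18,
--         'mi': 5,
--         'cloud': 7
--     }
--     words = [word.lower() for word in keywords]
--     ordered = []
--     for p in (18, 10, 9, 7, 5, 0):
--         ordered.extend(w for w in words if priority_dict.get(w, 0) == p)
--     return ordered[:3]
-- ===== Notes on version B (the rewrite author's own statement) =====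
-- stated objective: alternative
-- what changed: Replaces the stable comparison sort with a bucket gather: since the key takes only the six fixed priority values, B walks those values in descending order and collects each bucket's words in encounter order, then takes the first three.
import Mathlib
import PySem

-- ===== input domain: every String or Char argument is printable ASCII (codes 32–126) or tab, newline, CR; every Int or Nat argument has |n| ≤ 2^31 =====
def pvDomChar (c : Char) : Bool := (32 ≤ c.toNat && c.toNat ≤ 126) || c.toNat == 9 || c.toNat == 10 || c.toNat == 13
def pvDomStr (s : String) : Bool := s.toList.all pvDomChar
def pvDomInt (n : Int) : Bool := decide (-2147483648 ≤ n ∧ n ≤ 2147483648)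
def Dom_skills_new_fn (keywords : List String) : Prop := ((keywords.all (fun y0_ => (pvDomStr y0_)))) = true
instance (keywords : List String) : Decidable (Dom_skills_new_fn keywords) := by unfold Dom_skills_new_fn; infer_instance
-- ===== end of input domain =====

-- B replaces A's stable comparison sort by a bucket gather over the six fixed priority
-- values in descending order (alternative algorithm, same result; no speed claim).

-- ===== PORT A =====
-- A's priority dict literal
def pvPrioDictA : PySem.Dict String Int :=
  PySem.Dict.mk [("python", 10), ("java", 9), ("c", 18), ("mi", 5), ("cloud", 7)]

def skills_new_fn (keywords : List String) : List String :=
  let keywords := keywords.map (fun word => PySem.Str.lower word)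
  let sorted_keywords := PySem.List.sorted keywords (fun x => pvPrioDictA.getD x 0) true
  PySem.List.slice sorted_keywords none (some 3)

-- ===== PORT B =====
-- B's priority dict literal is the same constant; reuse pvPrioDictA
def skills_new_fn_alt (keywords : List String) : List String :=
  let words := keywords.map (fun word => PySem.Str.lower word)
  let ordered := ([18, 10, 9, 7, 5, 0] : List Int).foldl
    (fun acc p => acc ++ words.filter (fun w => pvPrioDictA.getD w 0 == p)) []
  ordered.take 3

-- ===== PRECONDITION & SPEC =====
def Spec_skills_new_fn (keywords : List String) (out : List String) : Prop := out = skills_new_fn_alt keywords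
instance (keywords : List String) (out : List String) : Decidable (Spec_skills_new_fn keywords out) := by unfold Spec_skills_new_fn; infer_instance

-- ===== CLAIM (what is proved, stated in full; the proofs are below) =====
def Claim_equal_skills_new_fn : Prop := ∀ (keywords : List String), Dom_skills_new_fn keywords → Spec_skills_new_fn keywords (skills_new_fn keywords)

-- ===== LEMMAS AND PROOFS =====

-- the key function takes only the six bucket values B walks
lemma prio_mem (s : String) : pvPrioDictA.getD s 0 ∈ ([18, 10, 9, 7, 5, 0] : List Int) := by
  simp only [pvPrioDictA, PySem.Dict.getD, PySem.Dict.get?_mk_cons]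
  split_ifs <;> simp [PySem.Dict.get?]

-- insertBy skips over a prefix it never inserts before
lemma insertBy_append {α : Type} (before : α → α → Bool) (x : α) (l t : List α)
    (h : ∀ y ∈ l, before x y = false) :
    PySem.List.insertBy before x (l ++ t) = l ++ PySem.List.insertBy before x t := by
  induction l with
  | nil => simp
  | cons a l ih =>
      simp only [List.cons_append, PySem.List.insertBy, h a (by simp)]
      simp only [Bool.false_eq_true, if_false, List.cons.injEq, true_and]
      exact ih fun y hy => h y (by simp [hy])

-- insertBy puts x in front when it goes before everything
lemma insertBy_front {α : Type} (before : α → α → Bool) (x : α) (t : List α)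
    (h : ∀ y ∈ t, before x y = true) :
    PySem.List.insertBy before x t = x :: t := by
  cases t with
  | nil => rfl
  | cons a t => simp [PySem.List.insertBy, h a (by simp)]

-- the reverse-stable insertion step appends x at the end of its own descending bucket
lemma insertBy_flatMap {α : Type} (key : α → Int) (ps : List Int) (f : Int → List α) (x : α)
    (hps : ps.Pairwise (· > ·)) (hx : key x ∈ ps) (hf : ∀ p ∈ ps, ∀ y ∈ f p, key y = p) :
    PySem.List.insertBy (fun a b => decide (key b < key a)) x (ps.flatMap f)
      = ps.flatMap (fun p => f p ++ if key x = p then [x] else []) := by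
  induction ps with
  | nil => simp at hx
  | cons p ps ih =>
      rw [List.pairwise_cons] at hps
      simp only [List.flatMap_cons]
      by_cases hxp : key x = p
      · rw [insertBy_append _ _ _ _ (fun y hy => by
          simp [hf p (by simp) y hy, hxp])]
        rw [insertBy_front _ _ _ (fun y hy => by
          simp only [List.mem_flatMap] at hy
          obtain ⟨q, hq, hyq⟩ := hy
          simp only [decide_eq_true_eq, hf q (by simp [hq]) y hyq, hxp]
          exact hps.1 q hq)]
        have hrest : ps.flatMap (fun q => f q ++ if key x = q then [x] else []) = ps.flatMap f := by
          apply List.flatMap_congr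
          intro q hq
          have : key x ≠ q := by have := hps.1 q hq; omega
          simp [this]
        rw [hrest, hxp]
        simp
      · have hx' : key x ∈ ps := by
          cases hx with
          | head => exact absurd rfl hxp
          | tail _ h => exact h
        rw [insertBy_append _ _ _ _ (fun y hy => by
          have hyp := hf p (by simp) y hy
          have hlt : key x < p := by
            rcases List.mem_cons.mp hx with h | h
            · exact absurd h hxp
            · exact hps.1 _ h
          simp [hyp]; omega)]
        rw [ih hps.2 hx' (fun q hq => hf q (by simp [hq]))]
        simp [hxp]

-- folding the insertion sort over words builds exactly the descending buckets
lemma foldl_insert_buckets (ws vs : List String) :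
    ws.foldl (fun acc x =>
        PySem.List.insertBy (fun a b => decide (pvPrioDictA.getD b 0 < pvPrioDictA.getD a 0)) x acc)
      (([18, 10, 9, 7, 5, 0] : List Int).flatMap
        (fun p => vs.filter (fun w => pvPrioDictA.getD w 0 == p)))
    = ([18, 10, 9, 7, 5, 0] : List Int).flatMap
        (fun p => (vs ++ ws).filter (fun w => pvPrioDictA.getD w 0 == p)) := by
  induction ws generalizing vs with
  | nil => simp
  | cons x ws ih =>
      simp only [List.foldl_cons]
      rw [insertBy_flatMap (fun w => pvPrioDictA.getD w 0) _ _ x (by decide) (prio_mem x)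
          (fun p _ y hy => by
            have := List.of_mem_filter hy
            exact beq_iff_eq.mp this)]
      have hstep : (([18, 10, 9, 7, 5, 0] : List Int).flatMap
            (fun p => vs.filter (fun w => pvPrioDictA.getD w 0 == p)
                ++ if pvPrioDictA.getD x 0 = p then [x] else []))
          = ([18, 10, 9, 7, 5, 0] : List Int).flatMap
            (fun p => (vs ++ [x]).filter (fun w => pvPrioDictA.getD w 0 == p)) := by
        apply List.flatMap_congr
        intro p _
        rw [List.filter_append]
        by_cases h : pvPrioDictA.getD x 0 = p <;> simp [h]
      rw [hstep, ih (vs ++ [x])]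
      simp

-- ===== VERDICT (by name: the statement is the Claim_ definition above) =====
theorem skills_new_fn_spec : Claim_equal_skills_new_fn := by
  intro keywords _
  unfold Spec_skills_new_fn skills_new_fn skills_new_fn_alt
  dsimp only
  rw [PySem.List.foldl_append_eq_flatMap, List.nil_append,
      PySem.List.sorted_rev_eq_foldl_insertBy,
      show (3 : Int) = ((3 : Nat) : Int) from rfl, PySem.List.slice_to_natCast]
  have := foldl_insert_buckets (keywords.map (fun word => PySem.Str.lower word)) []
  simp only [List.filter_nil, List.nil_append] at this
  rw [show (List.flatMap (fun _ => ([] : List String)) ([18, 10, 9, 7, 5, 0] : List Int)) = [] from by simp] at this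
  rw [this]
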